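-- pv_equiv track=rewrite | github.com/dongyun92/make-docs | chart_placement_rules.py | _find_suitable_image
-- ===== SOURCE A (Python) =====
-- from typing import List, Dict, Tuple, Optional
--
-- def _find_suitable_image(image_files: List[Dict], preferred_types: List[str], used_images: set) -> Optional[Dict]:
--     """적합한 이미지를 찾습니다."""
--     # 선호하는 차트 타입 순서로 검색
--     for chart_type in preferred_types:
--         for image_file in image_files:
--             if (image_file["chart_type"] == chart_type and
--                 image_file["filename"] not in used_images):
--                 return image_file
--
--     # 사용되지 않은 이미지 중 아무거나
--     for image_file in image_files:
--         if image_file["filename"] not in used_images: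
--             return image_file
--
--     return None
-- ===== SOURCE B (Python) =====
-- def _find_suitable_image(image_files, preferred_types, used_images):
--     # Single pass: for each unused image compute its preference rank (index of its
--     # chart_type in preferred_types, or len(preferred_types) if absent) and keep the
--     # first image with the smallest rank.
--     n = len(preferred_types)
--     best = None  # (rank, image)
--     for image_file in image_files:
--         if image_file["filename"] in used_images:
--             continue
--         t = image_file["chart_type"]
--         rank = preferred_types.index(t) if t in preferred_types else n
--         if best is None or rank < best[0]:
--             best = (rank, image_file)
--     return None if best is None else best[1]
-- ===== Notes on version B (the rewrite author's own statement) =====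
-- stated objective: alternative
-- what changed: B replaces A's nested loops (rescanning all images per preferred type, then a fallback scan) with a single pass over image_files that keeps the first unused image of minimal preference rank.
-- outside the precondition, e.g. on _find_suitable_image([{'chart_type': 'line'}], ['line'], set()): A raises KeyError, B raises KeyError
import Mathlib
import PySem

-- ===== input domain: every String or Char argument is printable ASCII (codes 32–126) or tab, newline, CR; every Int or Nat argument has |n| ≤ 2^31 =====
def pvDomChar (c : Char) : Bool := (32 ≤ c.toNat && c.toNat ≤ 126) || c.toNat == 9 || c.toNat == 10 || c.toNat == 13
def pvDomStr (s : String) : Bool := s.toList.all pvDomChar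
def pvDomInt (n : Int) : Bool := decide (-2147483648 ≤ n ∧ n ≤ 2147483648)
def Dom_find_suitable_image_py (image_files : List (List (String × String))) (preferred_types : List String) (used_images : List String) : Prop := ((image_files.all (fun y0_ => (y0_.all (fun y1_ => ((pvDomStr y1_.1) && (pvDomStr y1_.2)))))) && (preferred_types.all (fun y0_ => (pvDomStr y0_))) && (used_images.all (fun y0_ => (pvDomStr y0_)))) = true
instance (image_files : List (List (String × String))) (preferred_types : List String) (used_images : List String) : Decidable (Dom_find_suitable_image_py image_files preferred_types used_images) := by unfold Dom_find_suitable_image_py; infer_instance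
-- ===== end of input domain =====

-- B replaces A's nested loops (rescan of image_files per preferred type, plus a fallback
-- scan) with a single pass keeping the first unused image of minimal preference rank.

-- img[k] for an image dict; exact under Pre_ (key present, unique keys), where Python's
-- img[k] returns the stored value and never raises.
def pvImgGet (img : List (String × String)) (k : String) : String :=
  (PySem.Dict.mk img).getD k ""

-- ===== PORT A =====
def find_suitable_image_py (image_files : List (List (String × String))) (preferred_types : List String) (used_images : List String) : Option (List (String × String)) :=
  -- for chart_type in preferred_types: for image_file in image_files: if … return image_file
  match preferred_types.findSome? (fun chart_type =>
      image_files.find? (fun image_file =>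
        pvImgGet image_file "chart_type" == chart_type &&
        !(used_images.contains (pvImgGet image_file "filename")))) with
  | some image_file => some image_file
  | none =>
    -- fallback: any unused image
    match image_files.find? (fun image_file => !(used_images.contains (pvImgGet image_file "filename"))) with
    | some image_file => some image_file
    | none => none

-- ===== PORT B =====
def find_suitable_image_py_alt (image_files : List (List (String × String))) (preferred_types : List String) (used_images : List String) : Option (List (String × String)) :=
  let n := preferred_types.length
  -- the loop: best = None; for image_file in image_files: …
  let best : Option (Nat × List (String × String)) :=
    image_files.foldl (fun best image_file =>
      if used_images.contains (pvImgGet image_file "filename") then best  -- continue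
      else
        let t := pvImgGet image_file "chart_type"
        -- rank = preferred_types.index(t) if t in preferred_types else n
        let rank := if preferred_types.contains t then (PySem.List.index? preferred_types t).getD 0 else n
        match best with
        | none => some (rank, image_file)
        | some (r, _) => if rank < r then some (rank, image_file) else best) none
  -- return None if best is None else best[1]
  match best with
  | none => none
  | some (_, image_file) => some image_file

-- ===== PRECONDITION & SPEC =====
-- Pre_ restricts the assoc-list encoding to actual Python dicts: each image dict has
-- unique keys (a real dict cannot have duplicates) and carries the "chart_type" and
-- "filename" keys A subscripts — without them Python A raises KeyError.
def Pre_find_suitable_image_py (image_files : List (List (String × String))) (preferred_types : List String) (used_images : List String) : Prop :=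
  ∀ img ∈ image_files, (img.map Prod.fst).Nodup ∧
    (PySem.Dict.mk img).contains "chart_type" = true ∧
    (PySem.Dict.mk img).contains "filename" = true
instance (image_files : List (List (String × String))) (preferred_types : List String) (used_images : List String) : Decidable (Pre_find_suitable_image_py image_files preferred_types used_images) := by unfold Pre_find_suitable_image_py; infer_instance

def pvWitness_find_suitable_image_py : (List (List (String × String))) × List String × List String :=
  ([[("chart_type", "bar"), ("filename", "a.png")], [("chart_type", "line"), ("filename", "b.png")]], ["line", "bar"], ["b.png"])

def Spec_find_suitable_image_py (image_files : List (List (String × String))) (preferred_types : List String) (used_images : List String) (out : Option (List (String × String))) : Prop := out = find_suitable_image_py_alt image_files preferred_types used_images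
instance (image_files : List (List (String × String))) (preferred_types : List String) (used_images : List String) (out : Option (List (String × String))) : Decidable (Spec_find_suitable_image_py image_files preferred_types used_images out) := by unfold Spec_find_suitable_image_py; infer_instance

-- ===== CLAIM (what is proved, stated in full; the proofs are below) =====
def Claim_equal_find_suitable_image_py : Prop := ∀ (image_files : List (List (String × String))) (preferred_types : List String) (used_images : List String), Dom_find_suitable_image_py image_files preferred_types used_images → Pre_find_suitable_image_py image_files preferred_types used_images → Spec_find_suitable_image_py image_files preferred_types used_images (find_suitable_image_py image_files preferred_types used_images)

-- ===== LEMMAS AND PROOFS =====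

-- B's rank of a chart-type string relative to the preference list.
def pvRk (pts : List String) (t : String) : Nat :=
  if pts.contains t then (PySem.List.index? pts t).getD 0 else pts.length

-- The body of B's loop, with the used-filter stripped and the rank function abstracted.
def pvStep {T : Type} (rk : T → Nat) (best : Option (Nat × T)) (u : T) : Option (Nat × T) :=
  match best with
  | none => some (rk u, u)
  | some (r, _) => if rk u < r then some (rk u, u) else best

theorem pvRk_nil (t : String) : pvRk [] t = 0 := by
  simp [pvRk]

theorem pvRk_cons (c : String) (pts : List String) (t : String) :
    pvRk (c :: pts) t = if t == c then 0 else pvRk pts t + 1 := by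
  by_cases h : t = c
  · subst h
    rw [pvRk, PySem.List.index?_cons_self]
    simp
  · have hne : c ≠ t := fun hh => h hh.symm
    rw [pvRk, pvRk, PySem.List.index?_cons_of_ne pts hne]
    by_cases hm : t ∈ pts
    · obtain ⟨k, hk⟩ := Option.isSome_iff_exists.mp ((List.isSome_idxOf?).mpr hm)
      simp [hm, hk, h]
    · have hnone : List.idxOf? t pts = none := by
        simp [List.idxOf?_eq_none_iff, hm]
      simp [hm, hnone, h]

-- once the accumulator holds rank 0, nothing replaces it
theorem pv_f_zero {T : Type} (rk : T → Nat) (U : List T) (a : T) :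
    U.foldl (pvStep rk) (some (0, a)) = some (0, a) := by
  induction U with
  | nil => rfl
  | cons u U ih => simpa [pvStep] using ih

-- the first rank-0 element wins over any positive accumulator
theorem pv_f_zero_wins {T : Type} (rk : T → Nat) (U : List T) (u0 : T) :
    ∀ acc : Option (Nat × T), (∀ r x, acc = some (r, x) → 0 < r) →
    U.find? (fun u => rk u == 0) = some u0 →
    U.foldl (pvStep rk) acc = some (0, u0) := by
  induction U with
  | nil => intro acc _ hf; simp at hf
  | cons u U ih =>
    intro acc hacc hf
    by_cases hz : rk u = 0
    · rw [List.find?_cons_of_pos (by simp [hz])] at hf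
      injection hf with hf; subst hf
      have hstep : pvStep rk acc u = some (0, u) := by
        match acc with
        | none => simp [pvStep, hz]
        | some (r, x) =>
          have := hacc r x rfl
          simp [pvStep, hz, this]
      rw [List.foldl_cons, hstep, pv_f_zero]
    · rw [List.find?_cons_of_neg (by simp [hz])] at hf
      rw [List.foldl_cons]
      apply ih _ _ hf
      intro r x hx
      match acc with
      | none =>
        simp [pvStep] at hx
        omega
      | some (r', x') =>
        have hr' := hacc r' x' rfl
        simp only [pvStep] at hx
        split at hx <;> (injection hx with hx1; injection hx1 with h1 h2; omega)

-- if every rank in U is the pts'-rank plus one, the fold commutes with shifting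
theorem pv_f_shift {T : Type} (rk1 rk2 : T → Nat) (U : List T)
    (h : ∀ u ∈ U, rk1 u = rk2 u + 1) :
    ∀ acc : Option (Nat × T),
    U.foldl (pvStep rk1) (acc.map (fun p => (p.1 + 1, p.2))) =
      (U.foldl (pvStep rk2) acc).map (fun p => (p.1 + 1, p.2)) := by
  induction U with
  | nil => intro acc; rfl
  | cons u U ih =>
    intro acc
    have hu := h u (by simp)
    have hstep : pvStep rk1 (acc.map (fun p => (p.1 + 1, p.2))) u =
        (pvStep rk2 acc u).map (fun p => (p.1 + 1, p.2)) := by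
      match acc with
      | none => simp [pvStep, hu]
      | some (r, x) =>
        simp only [pvStep, Option.map_some, hu]
        by_cases hlt : rk2 u < r
        · simp [hlt, Nat.add_lt_add_right hlt 1]
        · have : ¬ (rk2 u + 1 < r + 1) := by omega
          simp [hlt, this]
    rw [List.foldl_cons, List.foldl_cons, hstep]
    exact ih (fun v hv => h v (by simp [hv])) (pvStep rk2 acc u)

theorem pv_find?_eq_head?_filter {T : Type} (l : List T) (p : T → Bool) :
    l.find? p = (l.filter p).head? := by
  induction l with
  | nil => rfl
  | cons a l ih =>
    by_cases h : p a = true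
    · rw [List.find?_cons_of_pos h, List.filter_cons_of_pos h, List.head?_cons]
    · rw [List.find?_cons_of_neg (by simp [h]), List.filter_cons_of_neg (by simp [h]), ih]

-- main characterisation: the single-pass argmin over U equals A's staged search over U
theorem pv_main {T : Type} (typ : T → String) :
    ∀ (pts : List String) (U : List T),
    (U.foldl (pvStep (fun u => pvRk pts (typ u))) none).map Prod.snd =
      (pts.findSome? (fun c => U.find? (fun u => typ u == c))).or U.head? := by
  intro pts
  induction pts with
  | nil =>
    intro U
    match U with
    | [] => rfl
    | u :: U =>
      rw [List.foldl_cons]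
      have h0 : pvStep (fun u => pvRk [] (typ u)) none u = some (0, u) := by
        simp [pvStep, pvRk_nil]
      rw [h0]
      have : U.foldl (pvStep (fun u => pvRk [] (typ u))) (some (0, u)) = some (0, u) :=
        pv_f_zero _ U u
      simp [this]
  | cons c pts ih =>
    intro U
    rw [List.findSome?_cons]
    by_cases hf : ∃ u0, U.find? (fun u => typ u == c) = some u0
    · obtain ⟨u0, hu0⟩ := hf
      have hpred : (fun u => pvRk (c :: pts) (typ u) == 0) = (fun u => typ u == c) := by
        funext u
        rw [pvRk_cons]
        by_cases h : typ u == c <;> simp [h]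
      have := pv_f_zero_wins (fun u => pvRk (c :: pts) (typ u)) U u0 none
        (by intro r x hx; simp at hx) (by rw [hpred]; exact hu0)
      rw [this, hu0]
      rfl
    · have hnone : U.find? (fun u => typ u == c) = none := by
        cases h : U.find? (fun u => typ u == c) with
        | none => rfl
        | some u0 => exact absurd ⟨u0, h⟩ hf
      have hall : ∀ u ∈ U, ¬ (typ u == c) = true := List.find?_eq_none.mp hnone
      have hshift : ∀ u ∈ U,
          pvRk (c :: pts) (typ u) = pvRk pts (typ u) + 1 := by
        intro u hu
        rw [pvRk_cons]
        simp [hall u hu]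
      have := pv_f_shift (fun u => pvRk (c :: pts) (typ u)) (fun u => pvRk pts (typ u)) U hshift none
      simp only [Option.map_none] at this
      rw [hnone, this, ← ih U]
      simp [Option.map_map]
      rfl

-- ===== VERDICT (by name: the statement is the Claim_ definition above) =====
theorem find_suitable_image_py_spec : Claim_equal_find_suitable_image_py := by
  intro image_files preferred_types used_images _ _
  unfold Spec_find_suitable_image_py find_suitable_image_py find_suitable_image_py_alt
  -- abbreviations
  set unusedP : List (String × String) → Bool :=
    fun image_file => !(used_images.contains (pvImgGet image_file "filename")) with hunused
  set typ : List (String × String) → String := fun img => pvImgGet img "chart_type" with htyp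
  set U := image_files.filter unusedP with hU
  -- B's loop = fold of pvStep over the unused-filtered list
  have hB : image_files.foldl (fun best image_file =>
        if used_images.contains (pvImgGet image_file "filename") then best
        else
          let t := pvImgGet image_file "chart_type"
          let rank := if preferred_types.contains t then (PySem.List.index? preferred_types t).getD 0
            else preferred_types.length
          match best with
          | none => some (rank, image_file)
          | some (r, _) => if rank < r then some (rank, image_file) else best)
        (none : Option (Nat × List (String × String)))
      = U.foldl (pvStep (fun u => pvRk preferred_types (typ u))) none := by
    rw [hU]
    rw [← PySem.List.foldl_if_eq_foldl_filter]
    apply PySem.List.foldl_congr_mem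
    intro acc x _
    by_cases hx : pvImgGet x "filename" ∈ used_images
    · rw [if_pos (by simpa using hx), hunused, if_neg (by simpa using hx)]
    · rw [if_neg (by simpa using hx), hunused, if_pos (by simpa using hx)]
      rcases acc with _ | ⟨r, y⟩ <;> rfl
  -- A's inner scans over image_files = scans over the unused-filtered list U
  have hInner : ∀ c : String, U.find? (fun u => typ u == c)
      = image_files.find? (fun image_file =>
          pvImgGet image_file "chart_type" == c &&
          !(used_images.contains (pvImgGet image_file "filename"))) := by
    intro c
    rw [hU, List.find?_filter]
    congr 1
    funext a
    by_cases h1 : unusedP a = true <;> by_cases h2 : typ a == c <;>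
      simp_all [hunused, htyp]
  have hFall : image_files.find? unusedP = U.head? := by
    rw [hU, pv_find?_eq_head?_filter]
  have key := pv_main typ preferred_types U
  simp only [hInner] at key
  -- match-to-combinator bridges
  have e1 : ∀ (o o2 : Option (List (String × String))),
      (match o with
        | some i => some i
        | none =>
          match o2 with
          | some i => some i
          | none => none) = o.or o2 := by
    intro o o2
    cases o <;> cases o2 <;> rfl
  have e2 : ∀ (o : Option (Nat × List (String × String))),
      (match o with | none => none | some (_, i) => some i) = o.map Prod.snd := by
    intro o
    rcases o with _ | ⟨r, i⟩ <;> rfl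
  dsimp only
  rw [hB, e1, e2, hFall, key]
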